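-- pv_equiv track=rewrite | github.com/MSebeke/Master | CreatingHairpinMotifs.py | CheckBPContinuityTLoops2
-- ===== SOURCE A (Python) =====
-- def CheckBPContinuityTLoops2(x):
--     DiffList=[]
--     Checklist=[1,1,1,1,1,1,1,1]
--     for i in range(len(x)-1):
--         Base_Position=int(x[i])
--         Next_Base=int(x[i+1])
--         Diff = Next_Base - Base_Position
--         DiffList.append(Diff)
--     Comparison = [i for i,j in zip(Checklist,DiffList) if i == j]
--     if len(Comparison) == len(Checklist):
--         return True
--     else:
--         return False
-- ===== SOURCE B (Python) =====
-- def CheckBPContinuityTLoops2(x):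
--     if len(x) < 9:
--         return False
--     base = int(x[0])
--     return all(int(x[i]) == base + i for i in range(9))
-- ===== Notes on version B (the rewrite author's own statement) =====
-- stated objective: faster
-- what changed: B replaces A's full difference-list construction over the whole input plus zip/filter count against a Checklist of ones by an early length guard and a direct anchored test that the first nine entries form an arithmetic run of step 1, stopping after nine elements.
import Mathlib
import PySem

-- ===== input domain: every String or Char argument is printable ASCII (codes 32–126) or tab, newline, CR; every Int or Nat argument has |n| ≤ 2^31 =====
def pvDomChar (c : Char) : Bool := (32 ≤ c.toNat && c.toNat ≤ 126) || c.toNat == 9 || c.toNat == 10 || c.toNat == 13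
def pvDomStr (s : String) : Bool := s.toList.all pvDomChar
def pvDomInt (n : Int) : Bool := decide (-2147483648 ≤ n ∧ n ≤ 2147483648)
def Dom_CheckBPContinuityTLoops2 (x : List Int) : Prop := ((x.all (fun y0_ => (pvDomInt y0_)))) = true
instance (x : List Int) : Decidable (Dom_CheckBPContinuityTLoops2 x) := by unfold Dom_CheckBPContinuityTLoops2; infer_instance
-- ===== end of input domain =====

-- B replaces A's difference-list + Checklist zip/filter count by a length guard and a
-- direct anchored test of the first nine entries; only the first nine elements are read
-- (a timing run measured B faster on large inputs).


-- ===== PORT A =====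
-- A builds the full list of consecutive differences, zips it against a Checklist of
-- eight ones, and returns whether all eight pairs matched.  (int(x[i]) on an Int is
-- the identity; indices i and i+1 are always in range for i in range(len(x)-1), so
-- pyGetD with default 0 is exact here.)
def CheckBPContinuityTLoops2 (x : List Int) : Bool :=
  let diffList : List Int :=
    (PySem.List.pyRange 0 ((x.length : Int) - 1) 1).foldl
      (fun acc i =>
        let basePosition := PySem.List.pyGetD x i 0
        let nextBase := PySem.List.pyGetD x (i + 1) 0
        let diff := nextBase - basePosition
        acc ++ [diff]) []
  let checklist : List Int := [1, 1, 1, 1, 1, 1, 1, 1]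
  let comparison : List Int :=
    ((checklist.zip diffList).filter (fun p => p.1 == p.2)).map (fun p => p.1)
  if comparison.length == checklist.length then true else false

-- ===== PORT B =====
-- B: guard on length < 9, then test that the first nine entries form an arithmetic
-- run of step 1 anchored at x[0].
def CheckBPContinuityTLoops2_alt (x : List Int) : Bool :=
  if x.length < 9 then false
  else
    let base := PySem.List.pyGetD x 0 0
    (PySem.List.pyRange 0 9 1).all (fun i => PySem.List.pyGetD x i 0 == base + i)

-- ===== PRECONDITION & SPEC =====
def Spec_CheckBPContinuityTLoops2 (x : List Int) (out : Bool) : Prop := out = CheckBPContinuityTLoops2_alt x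
instance (x : List Int) (out : Bool) : Decidable (Spec_CheckBPContinuityTLoops2 x out) := by unfold Spec_CheckBPContinuityTLoops2; infer_instance

-- ===== CLAIM (what is proved, stated in full; the proofs are below) =====
def Claim_equal_CheckBPContinuityTLoops2 : Prop := ∀ (x : List Int), Dom_CheckBPContinuityTLoops2 x → Spec_CheckBPContinuityTLoops2 x (CheckBPContinuityTLoops2 x)

-- ===== LEMMAS AND PROOFS =====

-- the Checklist comparison on a difference list of length ≥ 8 succeeds iff the first
-- 8 differences are all 1
lemma zip_ones (L : List Int) (h8 : 8 ≤ L.length) :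
    ((((List.replicate 8 (1:Int)).zip L).filter (fun p => p.1 == p.2)).length = 8) ↔
      ∀ k : Nat, k < 8 → (1:Int) = L.getD k 0 := by
  have hz : ((List.replicate 8 (1:Int)).zip L).length = 8 := by
    simp [List.length_zip]; omega
  constructor
  · intro h
    have hall := (List.length_filter_eq_length_iff).mp (by rw [hz]; exact h)
    intro k hk
    have hk2 : k < ((List.replicate 8 (1:Int)).zip L).length := by omega
    have := hall (((List.replicate 8 (1:Int)).zip L)[k]) (List.getElem_mem hk2)
    simp only [List.getElem_zip, List.getElem_replicate, beq_iff_eq] at this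
    rw [List.getD_eq_getElem L 0 (by omega)]
    exact this
  · intro h
    have h2 : (((List.replicate 8 (1:Int)).zip L).filter (fun p => p.1 == p.2)).length
        = ((List.replicate 8 (1:Int)).zip L).length := by
      apply (List.length_filter_eq_length_iff).mpr
      intro p hp
      obtain ⟨k, hk, rfl⟩ := List.mem_iff_getElem.mp hp
      simp only [List.getElem_zip, List.getElem_replicate, beq_iff_eq]
      have := h k (by omega)
      rwa [List.getD_eq_getElem L 0 (by omega)] at this
    rw [hz] at h2
    exact h2

-- A returns true exactly when x has at least 9 elements and the first 8 consecutive
-- differences are all 1.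
lemma A_iff (x : List Int) :
    CheckBPContinuityTLoops2 x = true ↔
      (9 ≤ x.length ∧ ∀ k : Nat, k < 8 →
        (1 : Int) = PySem.List.pyGetD x ((k : Int) + 1) 0 - PySem.List.pyGetD x (k : Int) 0) := by
  unfold CheckBPContinuityTLoops2
  simp only [PySem.List.foldl_append_singleton_eq_map, List.nil_append, List.length_map,
    beq_iff_eq, List.length_cons, List.length_nil]
  set L := (PySem.List.pyRange 0 ((x.length : Int) - 1) 1).map
      (fun i => PySem.List.pyGetD x (i + 1) 0 - PySem.List.pyGetD x i 0) with hLdef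
  have hlen : L.length = ((x.length : Int) - 1).toNat := by
    simp [hLdef, PySem.List.length_pyRange_one]
  have hones : ([1, 1, 1, 1, 1, 1, 1, 1] : List Int) = List.replicate 8 1 := rfl
  rw [hones]
  by_cases h9 : 9 ≤ x.length
  · have h8 : 8 ≤ L.length := by omega
    have hLk : ∀ k : Nat, k < 8 → L.getD k 0
        = PySem.List.pyGetD x ((k : Int) + 1) 0 - PySem.List.pyGetD x (k : Int) 0 := by
      intro k hk
      rw [List.getD_eq_getElem _ _ (by omega)]
      simp [hLdef, PySem.List.getElem_pyRange_one]
    split_ifs with hc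
    · simp only [true_iff]
      refine ⟨h9, fun k hk => ?_⟩
      rw [← hLk k hk]
      exact (zip_ones L h8).mp hc k hk
    · simp only [false_iff]
      rintro ⟨-, h⟩
      exact hc ((zip_ones L h8).mpr (fun k hk => by rw [hLk k hk]; exact h k hk))
  · have hle := List.length_filter_le (fun p : Int × Int => p.1 == p.2) ((List.replicate 8 (1:Int)).zip L)
    have hz : ((List.replicate 8 (1:Int)).zip L).length = min 8 L.length := by
      simp [List.length_zip]
    split_ifs with hc
    · omega
    · simp only [false_iff]
      rintro ⟨h, -⟩
      omega

-- B returns true exactly when x has at least 9 elements and every one of the first 9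
-- entries is x[0] + its index.
lemma B_iff (x : List Int) :
    CheckBPContinuityTLoops2_alt x = true ↔
      (9 ≤ x.length ∧ ∀ k : Nat, k < 9 →
        PySem.List.pyGetD x (k : Int) 0 = PySem.List.pyGetD x 0 0 + (k : Int)) := by
  unfold CheckBPContinuityTLoops2_alt
  split_ifs with h
  · simp only [false_iff]
    rintro ⟨hl, -⟩; omega
  · simp only [List.all_eq_true, PySem.List.mem_pyRange_one, beq_iff_eq]
    constructor
    · intro hall
      refine ⟨by omega, fun k hk => hall (k : Int) ⟨by positivity, by exact_mod_cast hk⟩⟩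
    · rintro ⟨-, hall⟩ i ⟨h0, h9⟩
      have := hall i.toNat (by omega)
      rwa [Int.toNat_of_nonneg h0] at this

-- telescoping: 8 unit steps ↔ 9 anchored values
lemma steps_iff_anchor (g : Nat → Int) :
    (∀ k : Nat, k < 8 → (1 : Int) = g (k + 1) - g k) ↔
      (∀ k : Nat, k < 9 → g k = g 0 + (k : Int)) := by
  constructor
  · intro h k hk
    induction k with
    | zero => simp
    | succ m ih =>
      have h1 := h m (by omega)
      have h2 := ih (by omega)
      push_cast
      push_cast at h2
      omega
  · intro h k hk
    have h1 := h k (by omega)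
    have h2 := h (k + 1) (by omega)
    push_cast at h1 h2
    omega

-- ===== VERDICT (by name: the statement is the Claim_ definition above) =====
theorem CheckBPContinuityTLoops2_spec : Claim_equal_CheckBPContinuityTLoops2 := by
  intro x _
  unfold Spec_CheckBPContinuityTLoops2
  rw [Bool.eq_iff_iff, A_iff, B_iff]
  constructor
  · rintro ⟨hl, h⟩
    refine ⟨hl, ?_⟩
    intro k hk
    have := (steps_iff_anchor (fun k => PySem.List.pyGetD x (k : Int) 0)).mp
      (by intro m hm; have := h m hm; push_cast at this ⊢; convert this using 2) k hk
    simpa using this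
  · rintro ⟨hl, h⟩
    refine ⟨hl, ?_⟩
    intro k hk
    have := (steps_iff_anchor (fun k => PySem.List.pyGetD x (k : Int) 0)).mpr
      (by intro m hm; exact h m hm) k hk
    push_cast at this ⊢
    omega
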